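-- pv_equiv track=rewrite | github.com/posl/comment_recommendation | script/split_gen/4_time/zh/129_D/7.py | get_squares
-- ===== SOURCE A (Python) =====
-- def get_squares(row,col):
--     squares = 0
--     for i in range(row):
--         if i == 0 or i == row - 1:
--             squares += col
--         else:
--             squares += 2
--     return squares
-- ===== SOURCE B (Python) =====
-- def get_squares(row, col):
--     if row <= 0:
--         return 0
--     if row == 1:
--         return col
--     return 2 * col + 2 * (row - 2)
-- ===== Notes on version B (the rewrite author's own statement) =====
-- stated objective: faster
-- what changed: Replaced the O(row) loop with a closed-form case split (0 rows, 1 row, >=2 rows: 2*col + 2*(row-2)).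
import Mathlib
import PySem

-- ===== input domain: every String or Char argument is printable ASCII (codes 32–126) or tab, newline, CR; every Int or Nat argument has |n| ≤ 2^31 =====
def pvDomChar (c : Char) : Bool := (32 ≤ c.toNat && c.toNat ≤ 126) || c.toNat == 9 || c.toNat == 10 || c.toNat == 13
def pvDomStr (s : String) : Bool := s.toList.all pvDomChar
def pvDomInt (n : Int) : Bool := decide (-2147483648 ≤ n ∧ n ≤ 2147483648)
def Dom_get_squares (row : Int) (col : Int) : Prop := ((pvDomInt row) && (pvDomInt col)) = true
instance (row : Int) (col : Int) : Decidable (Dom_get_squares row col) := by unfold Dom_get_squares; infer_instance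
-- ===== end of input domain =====

-- ===== PORT A =====
-- B replaces A's O(row) loop by a closed-form case split (objective: faster, asymptotic).
def get_squares (row : Int) (col : Int) : Int :=
  (PySem.List.pyRange 0 row 1).foldl
    (fun squares i => if i = 0 ∨ i = row - 1 then squares + col else squares + 2) 0

-- ===== PORT B =====
def get_squares_alt (row : Int) (col : Int) : Int :=
  if row ≤ 0 then 0
  else if row = 1 then col
  else 2 * col + 2 * (row - 2)

-- ===== PRECONDITION & SPEC =====
def Spec_get_squares (row : Int) (col : Int) (out : Int) : Prop := out = get_squares_alt row col
instance (row : Int) (col : Int) (out : Int) : Decidable (Spec_get_squares row col out) := by unfold Spec_get_squares; infer_instance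

-- ===== CLAIM (what is proved, stated in full; the proofs are below) =====
def Claim_equal_get_squares : Prop := ∀ (row : Int) (col : Int), Dom_get_squares row col → Spec_get_squares row col (get_squares row col)

-- ===== LEMMAS AND PROOFS =====

-- ===== VERDICT (by name: the statement is the Claim_ definition above) =====
theorem get_squares_spec : Claim_equal_get_squares := by
  intro row col _
  unfold Spec_get_squares get_squares get_squares_alt
  have hc : List.foldl (fun squares i => if i = 0 ∨ i = row - 1 then squares + col else squares + 2) 0
        (PySem.List.pyRange 0 row 1)
      = List.foldl (fun squares i => squares + (if i = 0 ∨ i = row - 1 then col else 2)) 0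
        (PySem.List.pyRange 0 row 1) :=
    PySem.List.foldl_congr_mem _ _ _ _ (fun acc x _ => by split_ifs <;> rfl)
  rw [hc, PySem.List.foldl_add]
  by_cases h0 : row ≤ 0
  · have : PySem.List.pyRange 0 row 1 = [] := by
      rw [PySem.List.pyRange_one]
      simp only [List.map_eq_nil_iff, List.range_eq_nil]
      omega
    simp [this, h0]
  · by_cases h1 : row = 1
    · subst h1
      rw [show PySem.List.pyRange 0 1 1 = [0] from PySem.List.pyRange_one_singleton 0]
      norm_num
    · -- row ≥ 2
      have h2 : (2:Int) ≤ row := by omega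
      rw [PySem.List.pyRange_one_append 0 1 row (by omega) (by omega),
          PySem.List.pyRange_one_append 1 (row - 1) row (by omega) (by omega),
          show PySem.List.pyRange 0 1 1 = [0] from PySem.List.pyRange_one_singleton 0,
          show PySem.List.pyRange (row - 1) row 1 = [row - 1] by
            have := PySem.List.pyRange_one_singleton (row - 1); rw [show row - 1 + 1 = row by ring] at this; exact this]
      have hmid : (PySem.List.pyRange 1 (row - 1) 1).map
          (fun i => if i = 0 ∨ i = row - 1 then col else 2)
          = (PySem.List.pyRange 1 (row - 1) 1).map (fun _ => (2:Int)) := by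
        apply List.map_congr_left
        intro x hx
        rw [PySem.List.mem_pyRange_one] at hx
        have : ¬ (x = 0 ∨ x = row - 1) := by omega
        simp [this]
      simp only [List.map_append, List.sum_append, hmid, List.map_cons, List.map_nil]
      have hlen : ((PySem.List.pyRange 1 (row - 1) 1).map (fun _ => (2:Int))).sum
          = 2 * (row - 2) := by
        rw [PySem.List.sum_map_const_int]
        rw [PySem.List.length_pyRange_one]
        have : ((row - 1 - 1).toNat : Int) = row - 2 := by omega
        rw [this]; ring
      rw [hlen]
      have hne : ¬ row = 1 := by omega
      have hle : ¬ row ≤ 0 := by omega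
      simp [hne, hle]
      ring
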